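-- pv_equiv track=rewrite | github.com/MarcerCyoon/TheGeniusRepository | catalog/templatetags/genius_extras.py | parse_spoilers
-- ===== SOURCE A (Python) =====
-- def parse_spoilers(value):
-- 	lst = value.split("||")
--
-- 	if len(lst) > 2:
-- 		string = ""
-- 		for i in range(0, len(lst)):
-- 			string += lst[i]
--
-- 			if i != len(lst) - 1:
-- 				if i % 2 == 0:
-- 					string += '<span class="spoiler">'
-- 				else:
-- 					string += "</span>"
--
-- 		return string
-- 	else:
-- 		return "||".join(lst)
-- ===== SOURCE B (Python) =====
-- def parse_spoilers(value):
--     if value.count("||") < 2: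
--         return value
--     out = []
--     k = 0
--     i = 0
--     n = len(value)
--     while i < n:
--         if value.startswith("||", i):
--             out.append('<span class="spoiler">' if k % 2 == 0 else "</span>")
--             k += 1
--             i += 2
--         else:
--             out.append(value[i])
--             i += 1
--     return "".join(out)
-- ===== Notes on version B (the rewrite author's own statement) =====
-- stated objective: alternative
-- what changed: A splits the input on the two-character spoiler separator and rebuilds the string with an index loop over the pieces; B makes a single left-to-right scan over the characters, copying them and replacing each separator occurrence with the alternating open/close tag as it goes.
import Mathlib
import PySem

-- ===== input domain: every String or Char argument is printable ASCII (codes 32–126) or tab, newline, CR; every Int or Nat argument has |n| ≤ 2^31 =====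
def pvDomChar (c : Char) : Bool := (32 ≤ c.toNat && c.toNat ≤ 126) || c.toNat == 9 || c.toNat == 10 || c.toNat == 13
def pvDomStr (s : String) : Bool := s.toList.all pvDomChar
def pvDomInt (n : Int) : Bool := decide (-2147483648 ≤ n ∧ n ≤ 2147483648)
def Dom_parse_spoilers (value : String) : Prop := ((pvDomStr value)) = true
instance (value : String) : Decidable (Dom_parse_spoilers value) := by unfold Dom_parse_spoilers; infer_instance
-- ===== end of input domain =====

-- B replaces A's split-then-indexed-rebuild with a single left-to-right character scan that
-- rewrites each "||" into the alternating open/close tag (objective: alternative, same behaviour).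

-- ===== PORT A =====
-- literal transliteration of A: lst = value.split("||"); if len(lst) > 2: indexed += loop; else "||".join(lst)
def parse_spoilers (value : String) : String :=
  let lst := PySem.Chars.splitOn value.toList "||".toList
  if lst.length > 2 then
    String.ofList ((PySem.List.pyRange 0 (lst.length) 1).foldl (fun s i =>
      let s := s ++ PySem.List.pyGetD lst i []
      if i ≠ (lst.length : Int) - 1 then
        if PySem.Int.mod i 2 = 0 then s ++ "<span class=\"spoiler\">".toList
        else s ++ "</span>".toList
      else s) [])
  else String.ofList (PySem.Chars.join "||".toList lst)

-- ===== PORT B =====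
-- the while loop of Source B: walk the characters once, replacing each "||" (k counts replacements)
def pvScanB : List Char → Int → List Char
  | [], _ => []
  | [c], _ => [c]
  | c :: d :: rest, k =>
      if c = '|' ∧ d = '|' then
        (if PySem.Int.mod k 2 = 0 then "<span class=\"spoiler\">".toList else "</span>".toList)
          ++ pvScanB rest (k + 1)
      else c :: pvScanB (d :: rest) k

def parse_spoilers_alt (value : String) : String :=
  if PySem.Str.count value "||" < 2 then value
  else String.ofList (pvScanB value.toList 0)

-- ===== PRECONDITION & SPEC =====
def Spec_parse_spoilers (value : String) (out : String) : Prop := out = parse_spoilers_alt value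
instance (value : String) (out : String) : Decidable (Spec_parse_spoilers value out) := by unfold Spec_parse_spoilers; infer_instance

-- ===== CLAIM (what is proved, stated in full; the proofs are below) =====
def Claim_equal_parse_spoilers : Prop := ∀ (value : String), Dom_parse_spoilers value → Spec_parse_spoilers value (parse_spoilers value)

-- ===== LEMMAS AND PROOFS =====

-- prepend a prefix to the first piece
def pvPrep (p : List Char) : List (List Char) → List (List Char)
  | h :: t => (p ++ h) :: t
  | [] => []

-- proof-only mirror of Python's str.split("||") (structural, fuel-free)
def pvSplit : List Char → List (List Char)
  | [] => [[]]
  | [c] => [[c]]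
  | c :: d :: rest =>
      if c = '|' ∧ d = '|' then [] :: pvSplit rest
      else pvPrep [c] (pvSplit (d :: rest))

def pvTag (i : Int) : List Char :=
  if PySem.Int.mod i 2 = 0 then "<span class=\"spoiler\">".toList else "</span>".toList

-- the string A's loop builds from the pieces, starting at index k (last piece gets no tag)
def pvBuild : List (List Char) → Int → List Char
  | [], _ => []
  | [p], _ => p
  | p :: q :: t, k => p ++ pvTag k ++ pvBuild (q :: t) (k + 1)

theorem pvSplit_ne_nil (cs : List Char) : pvSplit cs ≠ [] := by
  match cs with
  | [] => simp [pvSplit]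
  | [c] => simp [pvSplit]
  | c :: d :: rest =>
    simp only [pvSplit]
    split
    · simp
    · cases hE : pvSplit (d :: rest) with
      | nil => exact absurd hE (pvSplit_ne_nil _)
      | cons a b => simp [pvPrep, hE]

theorem pvSplit_cons_ex (cs : List Char) : ∃ h t, pvSplit cs = h :: t := by
  cases hE : pvSplit cs with
  | nil => exact absurd hE (pvSplit_ne_nil cs)
  | cons a b => exact ⟨a, b, rfl⟩

theorem pvSplitOn_go_eq (fuel : Nat) : ∀ (l cur : List Char) (acc : List (List Char)),
    l.length < fuel →
    PySem.Chars.splitOn.go ['|','|'] fuel l cur acc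
      = acc.reverse ++ pvPrep cur.reverse (pvSplit l) := by
  induction fuel with
  | zero => intro l cur acc h; omega
  | succ m ih =>
    intro l cur acc h
    match l with
    | [] =>
      rw [PySem.Chars.splitOn.go.eq_def]
      simp [pvSplit, pvPrep]
    | [c] =>
      rw [PySem.Chars.splitOn.go.eq_def]
      have hm : 0 < m := by simp at h; omega
      have hp : List.isPrefixOf ['|','|'] [c] = false := by
        simp [List.isPrefixOf]
      simp only [hp, Bool.false_eq_true, if_false]
      rw [ih [] (c :: cur) acc (by simpa using hm)]
      simp [pvSplit, pvPrep]
    | c :: d :: rest =>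
      rw [PySem.Chars.splitOn.go.eq_def]
      by_cases hcd : c = '|' ∧ d = '|'
      · obtain ⟨hc, hd⟩ := hcd
        subst hc; subst hd
        have hp : List.isPrefixOf ['|','|'] ('|' :: '|' :: rest) = true := by
          simp [List.isPrefixOf]
        simp only [hp, if_true]
        have hlen : rest.length < m := by simp at h; omega
        rw [show List.drop (['|','|'] : List Char).length ('|' :: '|' :: rest) = rest from rfl]
        rw [ih rest [] (cur.reverse :: acc) hlen]
        obtain ⟨h', t', hS⟩ := pvSplit_cons_ex rest
        simp [pvSplit, pvPrep, hS]
      · have hp : List.isPrefixOf ['|','|'] (c :: d :: rest) = false := by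
          simp [List.isPrefixOf]
          intro hc hd; exact hcd ⟨hc.symm, hd.symm⟩
        simp only [hp, Bool.false_eq_true, if_false]
        have hlen : (d :: rest).length < m := by simp at h ⊢; omega
        rw [ih (d :: rest) (c :: cur) acc hlen]
        obtain ⟨h', t', hS⟩ := pvSplit_cons_ex (d :: rest)
        simp [pvSplit, pvPrep, hS, hcd]

theorem pvSplitOn_eq (cs : List Char) :
    PySem.Chars.splitOn cs "||".toList = pvSplit cs := by
  have h2 : "||".toList = (['|','|'] : List Char) := by decide
  rw [h2, PySem.Chars.splitOn, pvSplitOn_go_eq (cs.length + 1) cs [] [] (by omega)]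
  obtain ⟨h', t', hS⟩ := pvSplit_cons_ex cs
  simp [pvPrep, hS]

theorem pvCount_go_eq (fuel : Nat) : ∀ (l : List Char) (acc : Nat),
    l.length ≤ fuel →
    PySem.Chars.count.go ['|','|'] fuel l acc = acc + ((pvSplit l).length - 1) := by
  induction fuel with
  | zero =>
    intro l acc h
    have : l = [] := by cases l <;> simp_all
    subst this
    rw [PySem.Chars.count.go.eq_def]
    simp [pvSplit]
  | succ m ih =>
    intro l acc h
    match l with
    | [] =>
      rw [PySem.Chars.count.go.eq_def]; simp [pvSplit]
    | [c] =>
      rw [PySem.Chars.count.go.eq_def]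
      have hp : List.isPrefixOf ['|','|'] [c] = false := by simp [List.isPrefixOf]
      simp only [hp, Bool.false_eq_true, if_false]
      rw [ih [] acc (by simp)]
      simp [pvSplit]
    | c :: d :: rest =>
      rw [PySem.Chars.count.go.eq_def]
      by_cases hcd : c = '|' ∧ d = '|'
      · obtain ⟨hc, hd⟩ := hcd; subst hc; subst hd
        have hp : List.isPrefixOf ['|','|'] ('|' :: '|' :: rest) = true := by
          simp [List.isPrefixOf]
        simp only [hp, if_true]
        have hlen : rest.length ≤ m := by simp at h; omega
        rw [show List.drop (['|','|'] : List Char).length ('|' :: '|' :: rest) = rest from rfl]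
        rw [ih rest (acc + 1) hlen]
        obtain ⟨h', t', hS⟩ := pvSplit_cons_ex rest
        simp [pvSplit, hS]
        omega
      · have hp : List.isPrefixOf ['|','|'] (c :: d :: rest) = false := by
          simp [List.isPrefixOf]
          intro hc hd; exact hcd ⟨hc.symm, hd.symm⟩
        simp only [hp, Bool.false_eq_true, if_false]
        have hlen : (d :: rest).length ≤ m := by simp at h ⊢; omega
        rw [ih (d :: rest) acc hlen]
        obtain ⟨h', t', hS⟩ := pvSplit_cons_ex (d :: rest)
        simp [pvSplit, hS, hcd, pvPrep]

theorem pvCount_eq (cs : List Char) :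
    PySem.Chars.count cs "||".toList = (pvSplit cs).length - 1 := by
  have h2 : "||".toList = (['|','|'] : List Char) := by decide
  rw [h2, PySem.Chars.count]
  rw [if_neg (by simp)]
  exact (pvCount_go_eq cs.length cs 0 (le_refl _)).trans (by omega)

-- "||".join(value.split("||")) == value
theorem pvJoin_pvSplit (cs : List Char) :
    PySem.Chars.join "||".toList (pvSplit cs) = cs := by
  have h2 : "||".toList = (['|','|'] : List Char) := by decide
  rw [h2]
  induction cs using pvSplit.induct with
  | case1 => simp [pvSplit, PySem.Chars.join, List.intercalate]
  | case2 c => simp [pvSplit, PySem.Chars.join, List.intercalate]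
  | case3 c d rest hcd ih =>
    obtain ⟨hc, hd⟩ := hcd; subst hc; subst hd
    obtain ⟨h', t', hS⟩ := pvSplit_cons_ex rest
    rw [hS] at ih
    simp only [pvSplit, if_pos (And.intro rfl rfl), hS]
    simpa [PySem.Chars.join, List.intercalate] using ih
  | case4 c d rest hcd ih =>
    obtain ⟨h', t', hS⟩ := pvSplit_cons_ex (d :: rest)
    rw [hS] at ih
    simp only [pvSplit, if_neg hcd, hS, pvPrep]
    cases t' with
    | nil => simpa [PySem.Chars.join, List.intercalate] using ih
    | cons q t'' =>
      simp only [PySem.Chars.join, List.intercalate] at ih ⊢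
      simp_all

-- B's scan builds exactly A's alternating-tag string over the split pieces
theorem pvScan_eq_build (cs : List Char) : ∀ (k : Int),
    pvScanB cs k = pvBuild (pvSplit cs) k := by
  induction cs using pvSplit.induct with
  | case1 => intro k; simp [pvScanB, pvSplit, pvBuild]
  | case2 c => intro k; simp [pvScanB, pvSplit, pvBuild]
  | case3 c d rest hcd ih =>
    obtain ⟨hc, hd⟩ := hcd; subst hc; subst hd
    intro k
    obtain ⟨h', t', hS⟩ := pvSplit_cons_ex rest
    rw [hS] at ih
    simp [pvScanB, pvSplit, hS, pvBuild, pvTag, ih]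
  | case4 c d rest hcd ih =>
    intro k
    obtain ⟨h', t', hS⟩ := pvSplit_cons_ex (d :: rest)
    simp only [pvScanB, if_neg hcd, pvSplit, hS, pvPrep, List.singleton_append]
    rw [ih k, hS]
    cases t' with
    | nil => simp [pvBuild]
    | cons q t'' => simp [pvBuild]

-- A's indexed foldl over the enumerated pieces equals pvBuild
theorem pvFoldA (lst : List (List Char)) : ∀ (k n : Int) (s : List Char),
    n = k + lst.length →
    (PySem.List.enumerate lst k).foldl (fun s (p : Int × List Char) =>
      let s := s ++ p.2
      if p.1 ≠ n - 1 then
        if PySem.Int.mod p.1 2 = 0 then s ++ "<span class=\"spoiler\">".toList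
        else s ++ "</span>".toList
      else s) s
    = s ++ pvBuild lst k := by
  induction lst with
  | nil => intro k n s _; simp [PySem.List.enumerate_nil, pvBuild]
  | cons p rest ih =>
    intro k n s hn
    rw [PySem.List.enumerate_cons]
    cases rest with
    | nil =>
      have hk : k = n - 1 := by simp at hn; omega
      simp [PySem.List.enumerate_nil, pvBuild, hk]
    | cons q t =>
      have hk : ¬ (k = n - 1) := by simp at hn; omega
      simp only [List.foldl_cons]
      rw [ih (k + 1) n _ (by simp at hn ⊢; omega)]
      simp only [pvBuild, pvTag, hk, ne_eq, not_false_iff, if_true]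
      split <;> simp

-- ===== VERDICT (by name: the statement is the Claim_ definition above) =====
theorem parse_spoilers_spec : Claim_equal_parse_spoilers := by
  intro value _
  unfold Spec_parse_spoilers parse_spoilers parse_spoilers_alt
  rw [pvSplitOn_eq]
  have hcount : PySem.Str.count value "||" = (pvSplit value.toList).length - 1 := by
    rw [PySem.Str.count, pvCount_eq]
  by_cases hlen : (pvSplit value.toList).length > 2
  · rw [if_pos hlen, if_neg (by omega)]
    congr 1
    have henum := PySem.List.enumerate_eq_map_pyRange (pvSplit value.toList) ([] : List Char)
    rw [pvScan_eq_build]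
    have h := pvFoldA (pvSplit value.toList) 0 ((pvSplit value.toList).length : Int) [] (by simp)
    rw [henum, List.foldl_map] at h
    simp only [PySem.List.len] at h
    simpa using h
  · rw [if_neg hlen, if_pos (by omega)]
    rw [pvJoin_pvSplit, String.ofList_toList]
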